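-- pv_equiv track=rewrite | github.com/Tatuanshik/pars_data | parser.py | compress_working_hours
-- ===== SOURCE A (Python) =====
-- def compress_working_hours(working_hours):
--     """Функция сжимает дни недели, которые повторяютя в удобный формат, например
--      из 'mon': '9:00 - 17:00' и 'tue': '9:00 - 17:00' wed': '9:00 - 17:00'
--      будет: mon - wed: 09:00 - 17:00"""
--     compressed_hours = {}
--     current_range = []
--     current_time = None
--     for day, time in working_hours.items():
--         if time != current_time:
--             if current_range:
--                 if len(current_range) > 1:
--                     compressed_hours[f"{current_range[0]}-{current_range[-1]}"] = current_time
--                 else: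
--                     compressed_hours[current_range[0]] = current_time
--             current_range = [day]
--             current_time = time
--         else:
--             current_range.append(day)
--     if current_range:
--         if len(current_range) > 1:
--             compressed_hours[f'{current_range[0]}-{current_range[-1]}'] = current_time
--         else:
--             compressed_hours[current_range[0]] = current_time
--     return compressed_hours
-- ===== SOURCE B (Python) =====
-- def compress_working_hours(working_hours):
--     # Run-skipping two-level index loop over parallel key/value arrays: the
--     # outer loop emits one key per maximal run, whose end the inner scan
--     # finds; no pending-run buffer, change detection or duplicated flush.
--     days = list(working_hours)
--     times = list(working_hours.values())
--     n = len(days)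
--     out = {}
--     i = 0
--     while i < n:
--         j = i + 1
--         while j < n and times[j] == times[i]:
--             j += 1
--         out[days[i] if j == i + 1 else f"{days[i]}-{days[j-1]}"] = times[i]
--         i = j
--     return out
-- ===== Notes on version B (the rewrite author's own statement) =====
-- stated objective: alternative
-- what changed: A's single-pass state machine (pending-run buffer, change detection against the previous time, duplicated flush block) is replaced by a run-skipping two-level index loop over parallel key/value arrays: the outer loop emits one key per maximal run, whose end an inner scan finds; no run buffer or current-time sentinel is kept.
import Mathlib
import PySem

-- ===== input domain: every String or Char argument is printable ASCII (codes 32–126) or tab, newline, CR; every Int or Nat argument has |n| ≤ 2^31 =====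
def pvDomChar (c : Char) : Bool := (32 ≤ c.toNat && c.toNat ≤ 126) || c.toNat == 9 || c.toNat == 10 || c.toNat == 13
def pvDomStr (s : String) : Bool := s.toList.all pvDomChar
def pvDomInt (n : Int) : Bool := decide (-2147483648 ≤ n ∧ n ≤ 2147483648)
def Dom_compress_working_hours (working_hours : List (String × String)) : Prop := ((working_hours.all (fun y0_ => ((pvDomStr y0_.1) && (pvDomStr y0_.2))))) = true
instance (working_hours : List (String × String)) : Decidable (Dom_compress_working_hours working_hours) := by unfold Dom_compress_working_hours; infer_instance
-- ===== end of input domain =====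

-- B replaces A's one-pass state machine (pending-run buffer, change detection,
-- duplicated flush) by a run-skipping two-level index loop over parallel
-- key/value arrays: the outer loop emits one key per maximal run, whose end an
-- inner scan finds (objective: alternative).

-- ===== PORT A =====
-- A's duplicated flush block ('if current_range: ... compressed_hours[...] = current_time').
-- current_time is never None when current_range is nonempty, so '.getD ""' is unreachable filler.
def pvFlushA (d : PySem.Dict String String) (range : List String) (t : Option String) :
    PySem.Dict String String :=
  if range.isEmpty then d
  else if range.length > 1 then
    d.insert (range.headD "" ++ "-" ++ range.getLastD "") (t.getD "")
  else d.insert (range.headD "") (t.getD "")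

-- A's loop body over state (compressed_hours, current_range, current_time)
def pvStepA (st : PySem.Dict String String × List String × Option String)
    (p : String × String) : PySem.Dict String String × List String × Option String :=
  if (some p.2) ≠ st.2.2 then (pvFlushA st.1 st.2.1 st.2.2, [p.1], some p.2)
  else (st.1, st.2.1 ++ [p.1], st.2.2)

def compress_working_hours (working_hours : List (String × String)) : List (String × String) :=
  let st := working_hours.foldl pvStepA (PySem.Dict.empty, [], none)
  (pvFlushA st.1 st.2.1 st.2.2).items

-- ===== PORT B =====
-- B's inner scan: 'j = i + 1; while j < n and times[j] == times[i]: j += 1'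
-- (the guard keeps the index in range, so '.getD ""' is unreachable filler)
def pvScan (times : List String) (t : String) (n : Nat) (j : Nat) : Nat :=
  if j < n then
    if times.getD j "" = t then pvScan times t n (j + 1) else j
  else j
termination_by n - j
decreasing_by omega

-- the inner scan never moves left (cited by pvOuterB's termination proof)
theorem pvScan_ge (times : List String) (t : String) (n : Nat) :
    ∀ (fuel j : Nat), n - j ≤ fuel → j ≤ pvScan times t n j := by
  intro fuel
  induction fuel with
  | zero =>
    intro j h
    rw [pvScan]
    have : ¬ j < n := by omega
    simp [this]
  | succ m ih =>
    intro j h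
    rw [pvScan]
    by_cases hj : j < n
    · rw [if_pos hj]
      by_cases he : times.getD j "" = t
      · rw [if_pos he]
        have := ih (j + 1) (by omega)
        omega
      · rw [if_neg he]
    · rw [if_neg hj]

-- B's outer while loop over parallel arrays days/times
def pvOuterB (days times : List String) (n : Nat)
    (out : PySem.Dict String String) (i : Nat) : PySem.Dict String String :=
  if i < n then
    let j := pvScan times (times.getD i "") n (i + 1)
    let key := if j = i + 1 then days.getD i ""
               else days.getD i "" ++ "-" ++ days.getD (j - 1) ""
    pvOuterB days times n (out.insert key (times.getD i "")) j
  else out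
termination_by n - i
decreasing_by
  have := pvScan_ge times (times.getD i "") n (n - (i + 1)) (i + 1) le_rfl
  omega

def compress_working_hours_alt (working_hours : List (String × String)) : List (String × String) :=
  let days := working_hours.map Prod.fst
  let times := working_hours.map Prod.snd
  (pvOuterB days times days.length PySem.Dict.empty 0).items

-- ===== PRECONDITION & SPEC =====
def Spec_compress_working_hours (working_hours : List (String × String)) (out : List (String × String)) : Prop := out = compress_working_hours_alt working_hours
instance (working_hours : List (String × String)) (out : List (String × String)) : Decidable (Spec_compress_working_hours working_hours out) := by unfold Spec_compress_working_hours; infer_instance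

-- ===== CLAIM (what is proved, stated in full; the proofs are below) =====
def Claim_equal_compress_working_hours : Prop := ∀ (working_hours : List (String × String)), Dom_compress_working_hours working_hours → Spec_compress_working_hours working_hours (compress_working_hours working_hours)

-- ===== LEMMAS AND PROOFS =====

-- Proof-only middle layer: B's loops re-read as structural recursion over the
-- suffix of the item list (run length of the head time, then one run per step).
def pvRunLen (time : String) : List (String × String) → Nat
  | [] => 0
  | p :: ps => if p.2 = time then pvRunLen time ps + 1 else 0

def pvGoB (out : PySem.Dict String String) :
    List (String × String) → PySem.Dict String String
  | [] => out
  | (day, time) :: rest =>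
    let k := pvRunLen time rest
    let key := if k = 0 then day
               else day ++ "-" ++ (((day, time) :: rest).getD k ("", "")).1
    pvGoB (out.insert key time) (rest.drop k)
termination_by items => items.length
decreasing_by simp

theorem pvRunLen_le (t : String) (xs : List (String × String)) :
    pvRunLen t xs ≤ xs.length := by
  induction xs with
  | nil => simp [pvRunLen]
  | cons p ps ih =>
    by_cases h : p.2 = t <;> simp [pvRunLen, h]
    omega

theorem pvRunLen_max (t : String) (xs : List (String × String)) :
    pvRunLen t (xs.drop (pvRunLen t xs)) = 0 := by
  induction xs with
  | nil => simp [pvRunLen]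
  | cons p ps ih =>
    by_cases h : p.2 = t
    · simpa [pvRunLen, h] using ih
    · simp [pvRunLen, h]

/-- The inner index scan from `j` counts exactly the run length of `t` in the
suffix `wh.drop j` of the item list. -/
theorem pvScanBridge (wh : List (String × String)) (t : String) :
    ∀ (fuel j : Nat), wh.length - j ≤ fuel →
      pvScan (wh.map Prod.snd) t wh.length j = j + pvRunLen t (wh.drop j) := by
  intro fuel
  induction fuel with
  | zero =>
    intro j h
    have hj : ¬ j < wh.length := by omega
    rw [pvScan]
    simp only [hj, if_false]
    rw [List.drop_eq_nil_of_le (by omega)]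
    simp [pvRunLen]
  | succ m ih =>
    intro j h
    by_cases hj : j < wh.length
    · have hdrop : wh.drop j = wh[j] :: wh.drop (j + 1) :=
        List.drop_eq_getElem_cons hj
      have hget : (wh.map Prod.snd).getD j "" = wh[j].2 := by
        rw [List.getD_eq_getElem _ _ (by simpa using hj)]
        simp
      rw [pvScan]
      simp only [hj, if_true, hget]
      by_cases he : wh[j].2 = t
      · rw [ih (j + 1) (by omega), hdrop]
        simp [pvRunLen, he]
        omega
      · simp only [he, if_false]
        rw [hdrop]
        simp [pvRunLen, he]
    · rw [pvScan]
      simp only [hj, if_false]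
      rw [List.drop_eq_nil_of_le (by omega)]
      simp [pvRunLen]

/-- The index-based outer loop from position `i` computes the suffix recursion
on `wh.drop i`. -/
theorem pvOuterBridge (wh : List (String × String)) :
    ∀ (fuel i : Nat) (out : PySem.Dict String String), wh.length - i ≤ fuel →
      pvOuterB (wh.map Prod.fst) (wh.map Prod.snd) wh.length out i
        = pvGoB out (wh.drop i) := by
  intro fuel
  induction fuel with
  | zero =>
    intro i out h
    have hi : ¬ i < wh.length := by omega
    rw [pvOuterB]
    simp only [hi, if_false]
    rw [List.drop_eq_nil_of_le (by omega), pvGoB]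
  | succ m ih =>
    intro i out h
    by_cases hi : i < wh.length
    · have hdrop : wh.drop i = wh[i] :: wh.drop (i + 1) :=
        List.drop_eq_getElem_cons hi
      have hgt : (wh.map Prod.snd).getD i "" = wh[i].2 := by
        rw [List.getD_eq_getElem _ _ (by simpa using hi)]
        simp
      have hgd : (wh.map Prod.fst).getD i "" = wh[i].1 := by
        rw [List.getD_eq_getElem _ _ (by simpa using hi)]
        simp
      set k := pvRunLen wh[i].2 (wh.drop (i + 1)) with hk
      have hkle : k ≤ (wh.drop (i + 1)).length := pvRunLen_le _ _
      have hklen : k ≤ wh.length - (i + 1) := by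
        simpa using hkle
      have hscan : pvScan (wh.map Prod.snd) wh[i].2 wh.length (i + 1) = i + 1 + k :=
        pvScanBridge wh wh[i].2 (wh.length - (i + 1)) (i + 1) le_rfl
      have hkey : (if i + 1 + k = i + 1 then (wh.map Prod.fst).getD i ""
          else (wh.map Prod.fst).getD i "" ++ "-" ++ (wh.map Prod.fst).getD (i + 1 + k - 1) "")
          = (if k = 0 then wh[i].1
              else wh[i].1 ++ "-" ++ ((wh[i] :: wh.drop (i + 1)).getD k ("", "")).1) := by
        by_cases h0 : k = 0
        · rw [if_pos (show i + 1 + k = i + 1 by omega), if_pos h0]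
          exact hgd
        · have hik : i + k < wh.length := by omega
          have hL : (wh.map Prod.fst).getD (i + 1 + k - 1) "" = wh[i + k].1 := by
            have he1 : i + 1 + k - 1 = i + k := by omega
            rw [he1, List.getD_eq_getElem _ _ (by simpa using hik)]
            simp
          have hR : ((wh[i] :: wh.drop (i + 1)).getD k ("", "")).1 = wh[i + k].1 := by
            obtain ⟨j', hj'⟩ : ∃ j', k = j' + 1 := ⟨k - 1, by omega⟩
            conv_lhs => rw [hj']
            rw [List.getD_cons_succ,
              List.getD_eq_getElem _ _ (show j' < (wh.drop (i + 1)).length by simp; omega),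
              List.getElem_drop]
            have he2 : wh[i + 1 + j'] = wh[i + k] := by
              congr 1
              omega
            rw [he2]
          rw [if_neg (by omega), if_neg h0, hgd, hL, hR]
      have hdrop2 : (wh.drop (i + 1)).drop k = wh.drop (i + 1 + k) := by
        rw [List.drop_drop]
      rw [pvOuterB]
      simp only [hi, if_true, hgt, hgd, hscan]
      rw [hdrop, pvGoB]
      simp only [← hk]
      rw [← hkey, ih (i + 1 + k) _ (by omega)]
      rw [hdrop2, ← hgt, ← hgd]
    · rw [pvOuterB]
      simp only [hi, if_false]
      rw [List.drop_eq_nil_of_le (by omega), pvGoB]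

/-- A bounded run never continues past its length: the element after the run
has a different time. Main invariant: A's loop from state (d, [day], some t)
over `xs` computes the suffix recursion on `(day, t) :: xs` with accumulator
`d`. -/
theorem pvChewA (xs : List (String × String)) :
    ∀ (d : PySem.Dict String String) (r : List String) (t : String),
      xs.foldl pvStepA (d, r, some t)
        = (xs.drop (pvRunLen t xs)).foldl pvStepA
            (d, r ++ ((xs.take (pvRunLen t xs)).map Prod.fst), some t) := by
  induction xs with
  | nil => intro d r t; simp
  | cons p ps ih =>
    intro d r t
    by_cases h : p.2 = t
    · have hstep : pvStepA (d, r, some t) p = (d, r ++ [p.1], some t) := by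
        simp [pvStepA, h]
      simp only [pvRunLen, h, List.foldl_cons, hstep]
      rw [ih]
      simp
    · simp [pvRunLen, h]

theorem pvMain (n : Nat) (xs : List (String × String)) (hn : xs.length ≤ n)
    (d : PySem.Dict String String) (day t : String) :
    (let st := xs.foldl pvStepA (d, [day], some t)
     pvFlushA st.1 st.2.1 st.2.2)
      = pvGoB d ((day, t) :: xs) := by
  induction n generalizing xs d day t with
  | zero =>
    have hx : xs = [] := List.length_eq_zero_iff.mp (by omega)
    subst hx
    rw [pvGoB]
    simp only [pvRunLen, List.drop_nil]
    rw [pvGoB]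
    simp [pvFlushA]
  | succ m ih =>
    have hkle : pvRunLen t xs ≤ xs.length := pvRunLen_le t xs
    set k := pvRunLen t xs with hk
    have hgo : pvGoB d ((day, t) :: xs)
        = pvGoB (d.insert (if k = 0 then day
            else day ++ "-" ++ (((day, t) :: xs).getD k ("", "")).1) t) (xs.drop k) := by
      rw [pvGoB]
    have hlen2 : ((xs.take k).map Prod.fst).length = k := by
      simp only [List.length_map, List.length_take]
      omega
    have hkey : (if k = 0 then day
        else day ++ "-" ++ (((day, t) :: xs).getD k ("", "")).1)
        = (if k = 0 then day
            else day ++ "-" ++ ((xs.take k).map Prod.fst).getLastD "") := by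
      by_cases h0 : k = 0
      · simp [h0]
      · have hk1 : k - 1 < xs.length := by omega
        have hcons : ((day, t) :: xs).getD k ("", "") = xs.getD (k - 1) ("", "") := by
          obtain ⟨j, hj⟩ : ∃ j, k = j + 1 := ⟨k - 1, by omega⟩
          rw [hj]
          simp
        have hidx : ((xs.take k).map Prod.fst)[k - 1]? = some (xs[k - 1].1) := by
          rw [List.getElem?_eq_getElem (by omega : k - 1 < ((xs.take k).map Prod.fst).length)]
          simp [List.getElem_take]
        have hval : (((day, t) :: xs).getD k ("", "")).1
            = ((xs.take k).map Prod.fst).getLastD "" := by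
          rw [hcons, List.getD_eq_getElem _ _ hk1,
            List.getLastD_eq_getLast?, List.getLast?_eq_getElem?, hlen2, hidx]
          rfl
        rw [if_neg h0, if_neg h0, hval]
    have hflush : pvFlushA d (day :: (xs.take k).map Prod.fst) (some t)
        = d.insert (if k = 0 then day
            else day ++ "-" ++ ((xs.take k).map Prod.fst).getLastD "") t := by
      by_cases h0 : k = 0
      · have : (xs.take k).map Prod.fst = [] := by
          rw [← List.length_eq_zero_iff, hlen2]; exact h0
        rw [this]
        simp [pvFlushA, h0]
      · have hne : (xs.take k).map Prod.fst ≠ [] := by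
          intro hc
          apply h0
          rw [← hlen2, hc]
          rfl
        have hlen3 : (day :: (xs.take k).map Prod.fst).length > 1 := by
          simp only [List.length_cons, hlen2]; omega
        obtain ⟨b, l', hb⟩ := List.exists_cons_of_ne_nil hne
        have hgl : (day :: (xs.take k).map Prod.fst).getLastD ""
            = ((xs.take k).map Prod.fst).getLastD "" := by
          rw [hb, List.getLastD_eq_getLast?, List.getLastD_eq_getLast?,
            List.getLast?_cons_cons]
        unfold pvFlushA
        rw [if_neg (by simp), if_pos hlen3, if_neg h0, hgl]
        rfl
    show (let st := xs.foldl pvStepA (d, [day], some t)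
          pvFlushA st.1 st.2.1 st.2.2) = _
    rw [pvChewA, ← hk]
    cases hdrop : xs.drop k with
    | nil =>
      simp only [List.foldl_nil]
      rw [hgo, hdrop, pvGoB, hkey]
      simp only [List.singleton_append]
      exact hflush
    | cons p ys =>
      have hne : p.2 ≠ t := by
        have h0 := pvRunLen_max t xs
        rw [← hk, hdrop] at h0
        intro hc
        simp [pvRunLen, hc] at h0
      have hstep : pvStepA (d, day :: (xs.take k).map Prod.fst, some t) p
          = (pvFlushA d (day :: (xs.take k).map Prod.fst) (some t), [p.1], some p.2) := by
        simp [pvStepA, hne]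
      have hys : ys.length ≤ m := by
        have h1 : (xs.drop k).length = xs.length - k := List.length_drop
        rw [hdrop] at h1
        simp at h1
        omega
      simp only [List.foldl_cons, List.cons_append, List.nil_append, hstep, hflush]
      rw [ih ys hys _ p.1 p.2, hgo, hdrop, hkey]

-- ===== VERDICT (by name: the statement is the Claim_ definition above) =====
theorem compress_working_hours_spec : Claim_equal_compress_working_hours := by
  intro wh _
  unfold Spec_compress_working_hours
  have halt : compress_working_hours_alt wh = (pvGoB PySem.Dict.empty wh).items := by
    unfold compress_working_hours_alt
    have := pvOuterBridge wh wh.length 0 PySem.Dict.empty (by omega)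
    simp only [List.length_map]
    rw [this]
    simp
  rw [halt]
  cases wh with
  | nil =>
    show (pvFlushA PySem.Dict.empty [] none).items = _
    rw [pvGoB]
    simp [pvFlushA]
  | cons p rest =>
    show (let st := List.foldl pvStepA (PySem.Dict.empty, [], none) (p :: rest)
          (pvFlushA st.1 st.2.1 st.2.2).items) = _
    have h1 : List.foldl pvStepA (PySem.Dict.empty, [], none) (p :: rest)
        = List.foldl pvStepA (PySem.Dict.empty, [p.1], some p.2) rest := by
      simp [pvStepA, pvFlushA]
    rw [h1]
    rw [← pvMain rest.length rest le_rfl PySem.Dict.empty p.1 p.2]
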